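-- pv_equiv track=rewrite | github.com/AzoeDesarrollos/pygpj | gen/viz.py | a_dos_columnas
-- ===== SOURCE A (Python) =====
-- def a_dos_columnas(items):
--     '''Separa una lista de items en dos columnas para paginar en una sola página.'''
--
--     c1 = []
--     c2 = []
--
--     for i in range(len(items)):
--         if i < len(items)/2:
--             c1.append(items[i])
--         else:
--             c2.append(items[i])
--
--     if len(c1) > len(c2):
--         for i in range(len(c1)-len(c2)):
--             c2.append('')
--
--     lineas = []
--     for i in range(len(c1)):
--         if len(c1[i]) > 32:
--             lineas.append(c1[i] +'\t'+ c2[i])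
--         elif len(c1[i]) > 23:
--             lineas.append(c1[i] +'\t'*2+ c2[i])
--         elif len(c1[i]) > 15:
--             lineas.append(c1[i] +'\t'*3+ c2[i])
--         elif len(c1[i]) > 7:
--             lineas.append(c1[i] +'\t'*4+ c2[i])
--         else:
--             lineas.append(c1[i] +'\t'*5+ c2[i])
--
--     return lineas
-- ===== SOURCE B (Python) =====
-- def a_dos_columnas(items):
--     '''Separa una lista de items en dos columnas para paginar en una sola página.'''
--     def fmt(a, b):
--         n = 5
--         for t in (7, 15, 23, 32):
--             if len(a) > t:
--                 n -= 1
--         return a + '\t' * n + b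
--
--     _S = object()
--     slow = iter(items)
--     fast = iter(items)
--     stack = []            # left-column items; top of stack = closest to the split
--     lines = []            # built back-to-front, reversed at the end
--     while next(fast, _S) is not _S:
--         x = next(slow)
--         if next(fast, _S) is _S:
--             # odd count: x is the last left-column item, paired with padding
--             lines.append(fmt(x, ''))
--             break
--         stack.append(x)
--     c2 = list(slow)       # whatever the slow pointer has not consumed: the right column
--     while stack:
--         lines.append(fmt(stack.pop(), c2.pop()))
--     lines.reverse()
--     return lines
-- ===== Notes on version B (the rewrite author's own statement) =====
-- stated objective: alternative
-- what changed: Replaces A's length/index-based construction (an indexed loop classifying items by i < n/2, a separate padding loop, then an indexed formatting loop) by a slow/fast-pointer split over two iterators that never computes len(items) or a midpoint index: the fast iterator advances two elements per step, the left column accumulates on an explicit stack, the lines are assembled back-to-front by popping the stack and the right column from their back ends, then reversed; the elif ladder becomes a threshold-countdown loop.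
import Mathlib
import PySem

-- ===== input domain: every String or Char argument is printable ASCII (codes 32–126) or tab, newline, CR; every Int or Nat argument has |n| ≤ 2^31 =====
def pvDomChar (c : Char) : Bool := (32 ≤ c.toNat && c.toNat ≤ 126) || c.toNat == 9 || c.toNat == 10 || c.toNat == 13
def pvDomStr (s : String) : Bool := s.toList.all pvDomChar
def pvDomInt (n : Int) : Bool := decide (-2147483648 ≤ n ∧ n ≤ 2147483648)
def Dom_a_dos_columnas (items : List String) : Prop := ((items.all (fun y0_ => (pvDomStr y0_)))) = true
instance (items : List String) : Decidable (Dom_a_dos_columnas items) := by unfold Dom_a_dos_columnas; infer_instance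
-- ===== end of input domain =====

-- B replaces A's length/index-based two-pass construction by a slow/fast-pointer split that
-- never computes len(items) or a midpoint index: the left column goes onto a stack, the lines
-- are assembled back-to-front by popping stack and right column, then reversed (objective: alternative).

-- ===== PORT A =====
-- 'i < len(items)/2' compares ints under true division; for integers i, n this is exactly 2*i < n.
-- '\t'*k is String.ofList (List.replicate k '\t') (exact for a literal k).
def a_dos_columnas (items : List String) : List String :=
  let n : Int := items.length
  let cs :=
    (PySem.List.pyRange 0 n 1).foldl
      (fun (p : List String × List String) i =>
        if 2 * i < n then (p.1 ++ [PySem.List.pyGetD items i ""], p.2)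
        else (p.1, p.2 ++ [PySem.List.pyGetD items i ""])) ([], [])
  let c1 := cs.1
  let c2 := cs.2
  let c2 :=
    if c1.length > c2.length then
      (PySem.List.pyRange 0 ((c1.length : Int) - (c2.length : Int)) 1).foldl
        (fun acc _ => acc ++ [""]) c2
    else c2
  (PySem.List.pyRange 0 (c1.length : Int) 1).foldl
    (fun lineas i =>
      if PySem.Str.len (PySem.List.pyGetD c1 i "") > 32 then
        lineas ++ [PySem.List.pyGetD c1 i "" ++ "\t" ++ PySem.List.pyGetD c2 i ""]
      else if PySem.Str.len (PySem.List.pyGetD c1 i "") > 23 then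
        lineas ++ [PySem.List.pyGetD c1 i "" ++ String.ofList (List.replicate 2 '\t') ++ PySem.List.pyGetD c2 i ""]
      else if PySem.Str.len (PySem.List.pyGetD c1 i "") > 15 then
        lineas ++ [PySem.List.pyGetD c1 i "" ++ String.ofList (List.replicate 3 '\t') ++ PySem.List.pyGetD c2 i ""]
      else if PySem.Str.len (PySem.List.pyGetD c1 i "") > 7 then
        lineas ++ [PySem.List.pyGetD c1 i "" ++ String.ofList (List.replicate 4 '\t') ++ PySem.List.pyGetD c2 i ""]
      else
        lineas ++ [PySem.List.pyGetD c1 i "" ++ String.ofList (List.replicate 5 '\t') ++ PySem.List.pyGetD c2 i ""]) []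

-- ===== PORT B =====
-- 'n = 5; for t in (7,15,23,32): if len(a) > t: n -= 1' is a fold over the threshold list;
-- '\t' * n is String.ofList (List.replicate n.toNat '\t').
def pvAltFmt (a b : String) : String :=
  let n : Int := ([7, 15, 23, 32] : List Int).foldl
      (fun n t => if PySem.Str.len a > t then n - 1 else n) 5
  a ++ String.ofList (List.replicate n.toNat '\t') ++ b

-- the first while loop: slow/fast iterators over the same list; the 'x = next(slow)' on an
-- exhausted slow iterator is unreachable from the entry call (Python would raise StopIteration),
-- those branches return a dummy. Result: (stack, lines-so-far, items left in the slow iterator).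
def pvAltSplit : List String → List String → List String × List String × List String
  | slow, [] => ([], [], slow)
  | [], [_] => ([], [], [])
  | x :: slow, [_] => ([], [pvAltFmt x ""], slow)
  | [], _ :: _ :: _ => ([], [], [])
  | x :: slow, _ :: _ :: fast =>
      let p := pvAltSplit slow fast
      (x :: p.1, p.2.1, p.2.2)

-- the second while loop: 'lines.append(fmt(stack.pop(), c2.pop()))' until the stack is empty
def pvAltUnwind : List String → List String → List String → List String
  | [], _, lines => lines
  | st :: sts, c2, lines =>
      pvAltUnwind (st :: sts).dropLast c2.dropLast
        (lines ++ [pvAltFmt ((st :: sts).getLastD "") (c2.getLastD "")])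
  termination_by stack _ _ => stack.length
  decreasing_by simp

def a_dos_columnas_alt (items : List String) : List String :=
  let p := pvAltSplit items items
  (pvAltUnwind p.1 p.2.2 p.2.1).reverse

-- ===== PRECONDITION & SPEC =====
def Spec_a_dos_columnas (items : List String) (out : List String) : Prop := out = a_dos_columnas_alt items
instance (items : List String) (out : List String) : Decidable (Spec_a_dos_columnas items out) := by unfold Spec_a_dos_columnas; infer_instance

-- ===== CLAIM (what is proved, stated in full; the proofs are below) =====
def Claim_equal_a_dos_columnas : Prop := ∀ (items : List String), Dom_a_dos_columnas items → Spec_a_dos_columnas items (a_dos_columnas items)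

-- ===== LEMMAS AND PROOFS =====

-- a fold that ignores its element leaves the accumulator unchanged
theorem pv_foldl_id {α β : Type} (l : List α) (b : β) :
    l.foldl (fun acc _ => acc) b = b := by
  induction l generalizing b with
  | nil => rfl
  | cons x xs ih => exact ih b

-- 'for _ in range(d): acc.append(x)' appends one copy per iteration
theorem pv_foldl_append_const {α β : Type} (l : List α) (x : β) (init : List β) :
    l.foldl (fun acc _ => acc ++ [x]) init = init ++ List.replicate l.length x := by
  induction l generalizing init with
  | nil => simp
  | cons y ys ih =>
      simp [List.foldl_cons, ih, List.replicate_succ, List.append_assoc]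

-- indexing the first h elements is take h
theorem pv_map_pyGetD_range_take {α : Type} (xs : List α) (d : α) (h : Nat)
    (hh : h ≤ xs.length) :
    (PySem.List.pyRange 0 (h : Int) 1).map (fun j => PySem.List.pyGetD xs j d) = xs.take h := by
  induction h with
  | zero => simp [PySem.List.pyRange_one_eq_nil]
  | succ k ih =>
      have hcast : ((k + 1 : Nat) : Int) = (k : Int) + 1 := by push_cast; ring
      rw [hcast, PySem.List.pyRange_one_succ_right (by exact_mod_cast Nat.zero_le k),
        List.map_append, ih (by omega)]
      have hlt : k < xs.length := by omega
      have e : PySem.List.pyGetD xs ((k : Nat) : Int) d = xs[k] := by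
        rw [PySem.List.pyGetD_natCast]; exact List.getD_eq_getElem _ _ hlt
      rw [List.map_singleton, e, List.take_add_one, List.getElem?_eq_getElem hlt]
      rfl

-- the elif ladder equals B's threshold-countdown format, pointwise
theorem pv_cascade_eq (s t : String) :
    (if PySem.Str.len s > 32 then s ++ "\t" ++ t
     else if PySem.Str.len s > 23 then s ++ String.ofList (List.replicate 2 '\t') ++ t
     else if PySem.Str.len s > 15 then s ++ String.ofList (List.replicate 3 '\t') ++ t
     else if PySem.Str.len s > 7 then s ++ String.ofList (List.replicate 4 '\t') ++ t
     else s ++ String.ofList (List.replicate 5 '\t') ++ t)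
    = pvAltFmt s t := by
  unfold pvAltFmt
  simp only [List.foldl_cons, List.foldl_nil]
  split_ifs <;> first | rfl | (exfalso; omega)

-- the final loop over range(len(c1)) is a map over the zip (equal lengths)
theorem pv_final_loop (c1 c2 : List String) (hlen : c2.length = c1.length) :
    (PySem.List.pyRange 0 (c1.length : Int) 1).foldl
      (fun lineas i =>
        if PySem.Str.len (PySem.List.pyGetD c1 i "") > 32 then
          lineas ++ [PySem.List.pyGetD c1 i "" ++ "\t" ++ PySem.List.pyGetD c2 i ""]
        else if PySem.Str.len (PySem.List.pyGetD c1 i "") > 23 then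
          lineas ++ [PySem.List.pyGetD c1 i "" ++ String.ofList (List.replicate 2 '\t') ++ PySem.List.pyGetD c2 i ""]
        else if PySem.Str.len (PySem.List.pyGetD c1 i "") > 15 then
          lineas ++ [PySem.List.pyGetD c1 i "" ++ String.ofList (List.replicate 3 '\t') ++ PySem.List.pyGetD c2 i ""]
        else if PySem.Str.len (PySem.List.pyGetD c1 i "") > 7 then
          lineas ++ [PySem.List.pyGetD c1 i "" ++ String.ofList (List.replicate 4 '\t') ++ PySem.List.pyGetD c2 i ""]
        else
          lineas ++ [PySem.List.pyGetD c1 i "" ++ String.ofList (List.replicate 5 '\t') ++ PySem.List.pyGetD c2 i ""]) []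
    = (c1.zip c2).map (fun p => pvAltFmt p.1 p.2) := by
  rw [PySem.List.foldl_congr_mem _ _
      (fun lineas i => lineas ++
        [(if PySem.Str.len (PySem.List.pyGetD c1 i "") > 32 then
            PySem.List.pyGetD c1 i "" ++ "\t" ++ PySem.List.pyGetD c2 i ""
          else if PySem.Str.len (PySem.List.pyGetD c1 i "") > 23 then
            PySem.List.pyGetD c1 i "" ++ String.ofList (List.replicate 2 '\t') ++ PySem.List.pyGetD c2 i ""
          else if PySem.Str.len (PySem.List.pyGetD c1 i "") > 15 then
            PySem.List.pyGetD c1 i "" ++ String.ofList (List.replicate 3 '\t') ++ PySem.List.pyGetD c2 i ""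
          else if PySem.Str.len (PySem.List.pyGetD c1 i "") > 7 then
            PySem.List.pyGetD c1 i "" ++ String.ofList (List.replicate 4 '\t') ++ PySem.List.pyGetD c2 i ""
          else
            PySem.List.pyGetD c1 i "" ++ String.ofList (List.replicate 5 '\t') ++ PySem.List.pyGetD c2 i "")])
      _ (by intro acc x _; simp only []; split_ifs <;> rfl)]
  rw [PySem.List.foldl_append_singleton_eq_map, List.nil_append]
  apply List.ext_getElem
  · simp [PySem.List.length_pyRange_one, hlen]
  · intro k h1 h2
    have hk : k < c1.length := by
      simpa [PySem.List.length_pyRange_one] using h1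
    have hk2 : k < c2.length := by omega
    rw [List.getElem_map, List.getElem_map, PySem.List.getElem_pyRange_one, List.getElem_zip]
    simp only [zero_add, PySem.List.pyGetD_natCast,
      List.getD_eq_getElem _ _ hk, List.getD_eq_getElem _ _ hk2]
    exact pv_cascade_eq _ _

-- A's classification loop produces (take h, drop h) with h = (n+1)/2
theorem pv_split_loop (items : List String) :
    ((PySem.List.pyRange 0 (items.length : Int) 1).foldl
      (fun (p : List String × List String) i =>
        if 2 * i < (items.length : Int) then (p.1 ++ [PySem.List.pyGetD items i ""], p.2)
        else (p.1, p.2 ++ [PySem.List.pyGetD items i ""])) ([], []))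
    = (items.take ((items.length + 1) / 2), items.drop ((items.length + 1) / 2)) := by
  have hhn : (items.length + 1) / 2 ≤ items.length := by omega
  have h2a : 2 * ((items.length + 1) / 2) ≤ items.length + 1 := by omega
  have h2b : items.length ≤ 2 * ((items.length + 1) / 2) := by omega
  have e1 : (PySem.List.pyRange 0 ((((items.length + 1) / 2 : Nat)) : Int) 1).foldl
      (fun (p : List String × List String) i =>
        if 2 * i < (items.length : Int) then (p.1 ++ [PySem.List.pyGetD items i ""], p.2)
        else (p.1, p.2 ++ [PySem.List.pyGetD items i ""])) ([], [])
      = (items.take ((items.length + 1) / 2), ([] : List String)) := by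
    rw [PySem.List.foldl_congr_mem _ _
        (fun (p : List String × List String) i => (p.1 ++ [PySem.List.pyGetD items i ""], p.2)) _
        (by
          intro acc x hx
          have hx' := (PySem.List.mem_pyRange_one).1 hx
          have h2 : 2 * ((((items.length + 1) / 2 : Nat)) : Int) ≤ (items.length : Int) + 1 := by
            exact_mod_cast h2a
          rw [if_pos (by omega)])]
    rw [show (fun (p : List String × List String) i => (p.1 ++ [PySem.List.pyGetD items i ""], p.2))
        = (fun (s : List String × List String) (e : Int) =>
            ((fun (l : List String) (j : Int) => l ++ [PySem.List.pyGetD items j ""]) s.1 e,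
             (fun (l : List String) (_ : Int) => l) s.2 e)) from rfl,
      PySem.List.foldl_prod_mk (fun (l : List String) (j : Int) => l ++ [PySem.List.pyGetD items j ""])
        (fun (l : List String) (_ : Int) => l)
        (PySem.List.pyRange 0 ((((items.length + 1) / 2 : Nat)) : Int) 1) [] [],
      PySem.List.foldl_append_singleton_eq_map, List.nil_append,
      pv_foldl_id, pv_map_pyGetD_range_take items "" _ hhn]
  have e2 : (PySem.List.pyRange ((((items.length + 1) / 2 : Nat)) : Int) (items.length : Int) 1).foldl
      (fun (p : List String × List String) i =>
        if 2 * i < (items.length : Int) then (p.1 ++ [PySem.List.pyGetD items i ""], p.2)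
        else (p.1, p.2 ++ [PySem.List.pyGetD items i ""]))
      (items.take ((items.length + 1) / 2), ([] : List String))
      = (items.take ((items.length + 1) / 2), items.drop ((items.length + 1) / 2)) := by
    rw [PySem.List.foldl_congr_mem _ _
        (fun (p : List String × List String) i => (p.1, p.2 ++ [PySem.List.pyGetD items i ""])) _
        (by
          intro acc x hx
          have hx' := (PySem.List.mem_pyRange_one).1 hx
          have h2 : (items.length : Int) ≤ 2 * ((((items.length + 1) / 2 : Nat)) : Int) := by
            exact_mod_cast h2b
          rw [if_neg (by omega)])]
    rw [show (fun (p : List String × List String) i => (p.1, p.2 ++ [PySem.List.pyGetD items i ""]))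
        = (fun (s : List String × List String) (e : Int) =>
            ((fun (l : List String) (_ : Int) => l) s.1 e,
             (fun (l : List String) (j : Int) => l ++ [PySem.List.pyGetD items j ""]) s.2 e)) from rfl,
      PySem.List.foldl_prod_mk (fun (l : List String) (_ : Int) => l)
        (fun (l : List String) (j : Int) => l ++ [PySem.List.pyGetD items j ""])
        (PySem.List.pyRange ((((items.length + 1) / 2 : Nat)) : Int) (items.length : Int) 1)
        (items.take ((items.length + 1) / 2)) [],
      pv_foldl_id,
      PySem.List.foldl_append_singleton_eq_map, List.nil_append,
      PySem.List.map_pyGetD_pyRange' items "" (by exact_mod_cast Nat.zero_le _)]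
    have h3 : (((((items.length + 1) / 2 : Nat)) : Int)).toNat = (items.length + 1) / 2 := by omega
    rw [h3]
  rw [PySem.List.pyRange_one_append 0 ((((items.length + 1) / 2 : Nat)) : Int) (items.length : Int)
      (by exact_mod_cast Nat.zero_le _) (by exact_mod_cast hhn), List.foldl_append, e1, e2]

-- A equals the common zip form: left column take h, right column drop h padded to length h
theorem pv_a_eq_zip (items : List String) :
    a_dos_columnas items
    = ((items.take ((items.length + 1) / 2)).zip
        (items.drop ((items.length + 1) / 2)
          ++ List.replicate ((items.length + 1) / 2 - items.length / 2) "")).map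
        (fun p => pvAltFmt p.1 p.2) := by
  simp only [a_dos_columnas, pv_split_loop]
  have hhn : (items.length + 1) / 2 ≤ items.length := by omega
  have lc1 : (items.take ((items.length + 1) / 2)).length = (items.length + 1) / 2 := by
    rw [List.length_take]; omega
  have lc2 : (items.drop ((items.length + 1) / 2)).length = items.length - (items.length + 1) / 2 :=
    List.length_drop
  have hpad :
      (if (items.take ((items.length + 1) / 2)).length > (items.drop ((items.length + 1) / 2)).length then
        (PySem.List.pyRange 0 (((items.take ((items.length + 1) / 2)).length : Int)
            - ((items.drop ((items.length + 1) / 2)).length : Int)) 1).foldl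
          (fun acc _ => acc ++ [""]) (items.drop ((items.length + 1) / 2))
      else items.drop ((items.length + 1) / 2))
      = items.drop ((items.length + 1) / 2) ++
          List.replicate ((items.length + 1) / 2 - items.length / 2) "" := by
    split_ifs with hgt
    · rw [pv_foldl_append_const, PySem.List.length_pyRange_one, lc1, lc2]
      have h0 : (((((items.length + 1) / 2 : Nat)) : Int)
            - (((items.length - (items.length + 1) / 2 : Nat)) : Int) - 0).toNat
          = (items.length + 1) / 2 - items.length / 2 := by omega
      rw [h0]
    · rw [lc1, lc2] at hgt
      have h0 : (items.length + 1) / 2 - items.length / 2 = 0 := by omega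
      rw [h0]
      simp
  rw [hpad]
  exact pv_final_loop _ _ (by rw [List.length_append, List.length_replicate, lc1, lc2]; omega)

-- dropping the last element of a k-prefix is the (k-1)-prefix
theorem pv_dropLast_take {α : Type} (l : List α) (k : Nat) (h : k ≤ l.length) :
    (l.take k).dropLast = l.take (k - 1) := by
  rw [List.dropLast_eq_take, List.take_take, List.length_take]
  congr 1; omega

-- the last element of a k-prefix is the element at index k-1
theorem pv_getLastD_take {α : Type} (l : List α) (k : Nat) (d : α) (h1 : 1 ≤ k)
    (h2 : k ≤ l.length) :
    (l.take k).getLastD d = l.getD (k - 1) d := by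
  rw [List.getLastD_eq_getLast?, List.getLast?_eq_getElem?, List.getD_eq_getElem?_getD]
  have hlen : (l.take k).length = k := by simp; omega
  rw [hlen, List.getElem?_take, if_pos (by omega)]

-- splitting a zip of equally long lists at its last pair
theorem pv_zip_snoc (st c2 : List String) (hne : st ≠ []) (hlen : c2.length = st.length) :
    st.zip c2 = (st.dropLast.zip c2.dropLast) ++ [(st.getLastD "", c2.getLastD "")] := by
  induction st generalizing c2 with
  | nil => exact absurd rfl hne
  | cons x sts ih =>
      match c2, hlen with
      | y :: c2s, hlen =>
        cases sts with
        | nil =>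
            match c2s, hlen with
            | [], _ => simp
        | cons x2 sts' =>
            match c2s, hlen with
            | y2 :: c2s', hlen =>
              have hlen' : (y2 :: c2s').length = (x2 :: sts').length := by
                simpa using hlen
              simp only [List.zip_cons_cons, ih (y2 :: c2s') (by simp) hlen',
                List.dropLast_cons₂, List.cons_append, List.getLastD_eq_getLast?,
                List.getLast?_cons_cons]

-- the unwind loop produces the reversed zip, formatted
theorem pv_unwind_spec (n : Nat) (stack c2 lines : List String)
    (hn : stack.length = n) (hlen : c2.length = stack.length) :
    pvAltUnwind stack c2 lines
      = lines ++ ((stack.zip c2).map (fun p => pvAltFmt p.1 p.2)).reverse := by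
  induction n generalizing stack c2 lines with
  | zero =>
      match stack, hn with
      | [], _ => simp [pvAltUnwind]
  | succ k ih =>
      match stack, hn with
      | st :: sts, hn =>
        have hc : c2.length = sts.length + 1 := by simpa using hlen
        rw [pvAltUnwind, ih _ _ _ (by simp at hn ⊢; omega) (by simp; omega),
          pv_zip_snoc _ _ (by simp) hlen]
        simp

-- characterization of the slow/fast split loop: with L = fast.length ≤ slow.length the stack
-- is the first L/2 elements, the odd leftover line is recorded, the rest of slow remains
theorem pv_split_spec (fast slow : List String) (hlen : fast.length ≤ slow.length) :
    pvAltSplit slow fast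
      = (slow.take (fast.length / 2),
         (if fast.length % 2 = 1 then [pvAltFmt (slow.getD (fast.length / 2) "") ""] else []),
         slow.drop ((fast.length + 1) / 2)) := by
  induction slow, fast using pvAltSplit.induct with
  | case1 slow => simp [pvAltSplit]
  | case2 => simp at hlen
  | case3 x slow => simp [pvAltSplit]
  | case4 a b fast => simp at hlen
  | case5 x slow a b fast ih =>
      have hl : fast.length + 2 ≤ slow.length + 1 := by simpa using hlen
      have ih' := ih (by omega)
      simp only [pvAltSplit, ih', List.length_cons]
      have h1 : (fast.length + 1 + 1) / 2 = fast.length / 2 + 1 := by omega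
      have h2 : (fast.length + 1 + 1) % 2 = fast.length % 2 := by omega
      have h3 : (fast.length + 1 + 1 + 1) / 2 = (fast.length + 1) / 2 + 1 := by omega
      rw [h1, h2, h3, List.take_succ_cons, List.drop_succ_cons, List.getD_cons_succ]

-- B equals the same zip form
theorem pv_b_eq_zip (items : List String) :
    a_dos_columnas_alt items
    = ((items.take ((items.length + 1) / 2)).zip
        (items.drop ((items.length + 1) / 2)
          ++ List.replicate ((items.length + 1) / 2 - items.length / 2) "")).map
        (fun p => pvAltFmt p.1 p.2) := by
  unfold a_dos_columnas_alt
  rw [pv_split_spec items items (le_refl _)]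
  dsimp only
  have hhalf : items.length / 2 ≤ items.length := by omega
  have hlen : (items.drop ((items.length + 1) / 2)).length = (items.take (items.length / 2)).length := by
    simp; omega
  rw [pv_unwind_spec (items.take (items.length / 2)).length _ _ _ rfl hlen]
  by_cases hodd : items.length % 2 = 1
  · have hh : (items.length + 1) / 2 = items.length / 2 + 1 := by omega
    have hpad : (items.length + 1) / 2 - items.length / 2 = 1 := by omega
    have hne : items.take ((items.length + 1) / 2) ≠ [] := by
      intro h
      have := congrArg List.length h
      rw [List.length_take] at this
      simp only [List.length_nil] at this
      omega
    rw [if_pos hodd, hpad, List.replicate_one,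
      pv_zip_snoc (items.take ((items.length + 1) / 2))
        (items.drop ((items.length + 1) / 2) ++ [""])
        hne (by simp; omega),
      List.dropLast_concat, List.getLastD_concat,
      pv_dropLast_take items ((items.length + 1) / 2) (by omega),
      pv_getLastD_take items ((items.length + 1) / 2) "" (by omega) (by omega)]
    have he : (items.length + 1) / 2 - 1 = items.length / 2 := by omega
    rw [he]
    simp
  · have hh : (items.length + 1) / 2 = items.length / 2 := by omega
    have hpad : (items.length + 1) / 2 - items.length / 2 = 0 := by omega
    rw [if_neg hodd, hpad, hh]
    simp

-- ===== VERDICT (by name: the statement is the Claim_ definition above) =====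
theorem a_dos_columnas_spec : Claim_equal_a_dos_columnas := by
  intro items _
  unfold Spec_a_dos_columnas
  rw [pv_a_eq_zip, pv_b_eq_zip]
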